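-- pv_equiv track=rewrite | github.com/efosternyarko/EC-K-typing-G1G4 | scripts/name_loci_positional.py | greedy_cluster
-- ===== SOURCE A (Python) =====
-- from collections import Counter, OrderedDict, defaultdict
--
-- def greedy_cluster(proteins: dict, neighbors: dict):
--     """
--     Greedy clustering (longest-sequence-first, CD-HIT style).
--
--     Returns
--     -------
--     member_to_rep : {pid: representative_pid}
--     rep_to_members: {rep_pid: [pid, ...]}
--     """
--     by_len = sorted(proteins, key=lambda p: -len(proteins[p]))
--
--     member_to_rep  = {}
--     rep_to_members = defaultdict(list)
--
--     for pid in by_len: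
--         if pid in member_to_rep:
--             continue
--         rep_to_members[pid].append(pid)
--         member_to_rep[pid] = pid
--
--         for other in by_len:
--             if other in member_to_rep:
--                 continue
--             if other in neighbors.get(pid, set()):
--                 rep_to_members[pid].append(other)
--                 member_to_rep[other] = pid
--
--     return member_to_rep, rep_to_members
-- ===== SOURCE B (Python) =====
-- def greedy_cluster(proteins: dict, neighbors: dict):
--     """Greedy longest-first clustering by repeated partition: peel off the
--     longest remaining protein as representative, split the remaining list into
--     its neighbors (the cluster) and the rest, recurse on the rest; both result
--     dicts are assembled once at the end from the cluster list."""
--     by_len = sorted(proteins, key=lambda p: -len(proteins[p]))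
--     clusters = []
--     remaining = by_len
--     while remaining:
--         rep, rest = remaining[0], remaining[1:]
--         nbrs = neighbors.get(rep, set())
--         members = [o for o in rest if o in nbrs]
--         remaining = [o for o in rest if o not in nbrs]
--         clusters.append((rep, [rep] + members))
--     member_to_rep = {m: rep for rep, ms in clusters for m in ms}
--     rep_to_members = dict(clusters)
--     return member_to_rep, rep_to_members
-- ===== Notes on version B (the rewrite author's own statement) =====
-- stated objective: alternative
-- what changed: B replaces A's stateful dict-driven double scan by a recursive partition: it repeatedly splits the remaining sorted list at its head into that representative's neighbors and the rest, collects the clusters as a list, and assembles both result dicts once at the end.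
import Mathlib
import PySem

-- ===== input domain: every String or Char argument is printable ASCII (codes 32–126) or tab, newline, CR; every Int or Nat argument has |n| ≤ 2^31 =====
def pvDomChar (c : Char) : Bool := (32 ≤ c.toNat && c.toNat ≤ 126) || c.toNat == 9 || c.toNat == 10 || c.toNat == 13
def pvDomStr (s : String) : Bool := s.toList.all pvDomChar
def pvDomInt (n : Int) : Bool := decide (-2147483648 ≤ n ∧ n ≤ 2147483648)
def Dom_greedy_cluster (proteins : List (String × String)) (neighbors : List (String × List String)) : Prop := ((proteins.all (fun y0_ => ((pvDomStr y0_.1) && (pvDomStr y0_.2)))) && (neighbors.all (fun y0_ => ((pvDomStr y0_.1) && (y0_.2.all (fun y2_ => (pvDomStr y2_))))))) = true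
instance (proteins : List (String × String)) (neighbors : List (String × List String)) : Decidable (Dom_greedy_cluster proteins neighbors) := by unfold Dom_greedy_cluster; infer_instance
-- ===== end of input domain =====

-- B computes the same greedy longest-first clustering by recursive partition of the
-- remaining list (clusters collected as a list, dicts assembled once at the end)
-- instead of A's dict-driven rescans. Equivalence is about the RETURN value
-- (neither Python mutates its arguments).

-- ===== PORT A =====
-- A's outer-loop body: skip assigned pids, else open a cluster and rescan ALL of by_len.
def gcStepA (nd : PySem.Dict String (List String)) (byLen : List String)
    (s : PySem.Dict String String × PySem.Dict String (List String)) (pid : String) :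
    PySem.Dict String String × PySem.Dict String (List String) :=
  if s.1.contains pid then s
  else
    byLen.foldl (fun t other =>
        if t.1.contains other then t
        else if (nd.getD pid []).contains other then
          (t.1.insert other pid, t.2.modify pid [] (· ++ [other]))
        else t)
      (s.1.insert pid pid, s.2.modify pid [] (· ++ [pid]))

def greedy_cluster (proteins : List (String × String)) (neighbors : List (String × List String)) : (List (String × String)) × (List (String × List String)) :=
  let pd : PySem.Dict String String := PySem.Dict.mk proteins
  let nd : PySem.Dict String (List String) := PySem.Dict.mk neighbors
  let byLen := PySem.List.sorted pd.keys (fun p => -(PySem.Str.len (pd.getD p ""))) false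
  let fin := byLen.foldl (gcStepA nd byLen) (PySem.Dict.empty, PySem.Dict.empty)
  (fin.1.items, fin.2.items)

-- ===== PORT B =====
-- B's while loop: peel off the head as representative, partition the rest into its
-- neighbors (the cluster) and the remaining list, continue on the latter.
def gcClusters (nd : PySem.Dict String (List String)) : List String → List (String × List String)
  | [] => []
  | rep :: rest =>
    (rep, rep :: rest.filter (fun o => (nd.getD rep []).contains o)) ::
      gcClusters nd (rest.filter (fun o => !(nd.getD rep []).contains o))
termination_by l => l.length
decreasing_by
  simp only [List.length_cons, List.length_unattach]
  exact Nat.lt_succ_of_le ((List.length_filter_le _ _).trans (Nat.le_of_eq List.length_attach))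

def greedy_cluster_alt (proteins : List (String × String)) (neighbors : List (String × List String)) : (List (String × String)) × (List (String × List String)) :=
  let pd : PySem.Dict String String := PySem.Dict.mk proteins
  let nd : PySem.Dict String (List String) := PySem.Dict.mk neighbors
  let byLen := PySem.List.sorted pd.keys (fun p => -(PySem.Str.len (pd.getD p ""))) false
  let clusters := gcClusters nd byLen
  -- {m: rep for rep, ms in clusters for m in ms}
  let m2r := clusters.foldl (fun d c => c.2.foldl (fun d x => d.insert x c.1) d) PySem.Dict.empty
  -- dict(clusters)
  let r2m := clusters.foldl (fun d c => d.insert c.1 c.2) PySem.Dict.empty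
  (m2r.items, r2m.items)

-- ===== PRECONDITION & SPEC =====
-- Pre_ excludes proteins association lists with duplicate keys: they do not represent a
-- Python dict (A's argument type), so no Python behaviour defines the shadowed entries.
def Pre_greedy_cluster (proteins : List (String × String)) (_neighbors : List (String × List String)) : Prop :=
  (proteins.map (·.1)).Nodup
instance (proteins : List (String × String)) (neighbors : List (String × List String)) : Decidable (Pre_greedy_cluster proteins neighbors) := by unfold Pre_greedy_cluster; infer_instance

def pvWitness_greedy_cluster : (List (String × String)) × (List (String × List String)) :=
  ([("ab", "xx"), ("b", "x")], [("ab", ["b"])])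

def Spec_greedy_cluster (proteins : List (String × String)) (neighbors : List (String × List String)) (out : (List (String × String)) × (List (String × List String))) : Prop := out = greedy_cluster_alt proteins neighbors
instance (proteins : List (String × String)) (neighbors : List (String × List String)) (out : (List (String × String)) × (List (String × List String))) : Decidable (Spec_greedy_cluster proteins neighbors out) := by unfold Spec_greedy_cluster; infer_instance

-- ===== CLAIM (what is proved, stated in full; the proofs are below) =====
def Claim_equal_greedy_cluster : Prop := ∀ (proteins : List (String × String)) (neighbors : List (String × List String)), Dom_greedy_cluster proteins neighbors → Pre_greedy_cluster proteins neighbors → Spec_greedy_cluster proteins neighbors (greedy_cluster proteins neighbors)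

-- ===== LEMMAS AND PROOFS =====

-- `modify` at the same key twice composes.
theorem gc_modify_modify (d : PySem.Dict String (List String)) (k : String)
    (f g : List String → List String) :
    (d.modify k [] f).modify k [] g = d.modify k [] (fun x => g (f x)) := by
  show ((d.insert k (f (d.getD k []))).insert k (g ((d.insert k (f (d.getD k []))).getD k []))) = _
  rw [PySem.Dict.getD_insert_self, PySem.Dict.insert_insert_self]
  rfl

theorem gc_modify_not_contains (d : PySem.Dict String (List String)) (k : String)
    (h : d.contains k = false) (f : List String → List String) :
    d.modify k [] f = d.insert k (f []) := by
  have h0 : d.getD k [] = [] := PySem.Dict.getD_of_not_contains (d := d) (k := k) (d0 := []) h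
  show d.insert k (f (d.getD k [])) = _
  rw [h0]

-- contains of a constant-value insert loop
theorem gc_contains_foldl_insert (l : List String) (d : PySem.Dict String String)
    (v x : String) :
    (l.foldl (fun d o => d.insert o v) d).contains x = (d.contains x || l.contains x) := by
  induction l generalizing d with
  | nil => simp
  | cons o t ih =>
    simp only [List.foldl_cons, ih, PySem.Dict.contains_insert, List.contains_cons]
    cases h : x == o <;> simp

-- A's inner scan over a duplicate-free list = one filter, then the two insert folds
theorem gc_innerA (nbrs : List String) (pid : String) (scan : List String)
    (hsc : scan.Nodup) (m1 : PySem.Dict String String) (r1 : PySem.Dict String (List String)) :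
    scan.foldl (fun t other =>
        if t.1.contains other then t
        else if nbrs.contains other then (t.1.insert other pid, t.2.modify pid [] (· ++ [other]))
        else t) (m1, r1)
    = ((scan.filter (fun o => !m1.contains o && nbrs.contains o)).foldl
         (fun m o => m.insert o pid) m1,
       (scan.filter (fun o => !m1.contains o && nbrs.contains o)).foldl
         (fun r o => r.modify pid [] (· ++ [o])) r1) := by
  induction scan generalizing m1 r1 with
  | nil => rfl
  | cons o t ih =>
    obtain ⟨hot, htnd⟩ := List.nodup_cons.mp hsc
    simp only [List.foldl_cons, List.filter_cons]
    by_cases h1 : m1.contains o = true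
    · rw [if_pos h1]
      simp only [h1, Bool.not_true, Bool.false_and, Bool.false_eq_true, if_false]
      exact ih htnd m1 r1
    · have h1f : m1.contains o = false := by simpa using h1
      rw [if_neg h1]
      by_cases h2 : nbrs.contains o = true
      · rw [if_pos h2]
        simp only [h1f, h2, Bool.not_false, Bool.true_and, if_pos]
        rw [ih htnd (m1.insert o pid) (r1.modify pid [] (· ++ [o]))]
        have hfe : t.filter (fun x => !(m1.insert o pid).contains x && nbrs.contains x)
            = t.filter (fun x => !m1.contains x && nbrs.contains x) := by
          apply List.filter_congr
          intro x hx
          have hxo : (x == o) = false := by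
            simp only [beq_eq_false_iff_ne]
            intro h; exact hot (h ▸ hx)
          rw [PySem.Dict.contains_insert, hxo, Bool.false_or]
        rw [hfe]
        simp [List.foldl_cons]
      · have h2f : nbrs.contains o = false := by simpa using h2
        rw [if_neg h2]
        simp only [h2f, Bool.and_false, Bool.false_eq_true, reduceIte]
        exact ih htnd m1 r1

-- appending members one by one into rep_to_members via modify = one modify of the whole list
theorem gc_rfold (pid : String) (ms : List String) (r : PySem.Dict String (List String))
    (cl : List String) :
    ms.foldl (fun r o => r.modify pid [] (· ++ [o])) (r.modify pid [] (· ++ cl))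
    = r.modify pid [] (· ++ (cl ++ ms)) := by
  induction ms generalizing cl with
  | nil => simp
  | cons o t ih =>
    simp only [List.foldl_cons]
    rw [gc_modify_modify]
    have : (fun x => (x ++ cl) ++ [o]) = (fun x => x ++ (cl ++ [o])) := by
      funext x; rw [List.append_assoc]
    rw [this, ih (cl ++ [o]), List.append_assoc]
    rfl

-- THE BRIDGE: A's outer fold over any duplicate-free tail l carrying state (m, r) equals
-- B's cluster list of the still-unassigned part of l, folded into (m, r) —
-- provided the unassigned part of byLen and of l coincide and every key of r is assigned.
theorem gc_main (nd : PySem.Dict String (List String)) (byLen : List String)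
    (hbl : byLen.Nodup) (l : List String) (m : PySem.Dict String String)
    (r : PySem.Dict String (List String)) (hnd : l.Nodup)
    (hfil : byLen.filter (fun p => !m.contains p) = l.filter (fun p => !m.contains p))
    (hinv : ∀ k, r.contains k = true → m.contains k = true) :
    l.foldl (gcStepA nd byLen) (m, r)
    = ((gcClusters nd (l.filter (fun p => !m.contains p))).foldl
         (fun d c => c.2.foldl (fun d x => d.insert x c.1) d) m,
       (gcClusters nd (l.filter (fun p => !m.contains p))).foldl
         (fun d c => d.insert c.1 c.2) r) := by
  induction l generalizing m r with
  | nil => simp [gcClusters]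
  | cons pid rest ih =>
    obtain ⟨hpr, hrnd⟩ := List.nodup_cons.mp hnd
    simp only [List.foldl_cons]
    by_cases hp : m.contains pid = true
    · have hstep : gcStepA nd byLen (m, r) pid = (m, r) := by
        unfold gcStepA; rw [if_pos hp]
      have hfc : (pid :: rest).filter (fun p => !m.contains p)
          = rest.filter (fun p => !m.contains p) := by
        simp [hp]
      rw [hstep, hfc, ih m r hrnd (hfil.trans hfc) hinv]
    · have hpf : m.contains pid = false := by simpa using hp
      have hfc : (pid :: rest).filter (fun p => !m.contains p)
          = pid :: rest.filter (fun p => !m.contains p) := by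
        simp [hpf]
      have hrc : r.contains pid = false := by
        cases hc : r.contains pid with
        | false => rfl
        | true => exact absurd (hinv pid hc) hp
      -- name the pieces
      set nbrs := nd.getD pid [] with hnbrs
      set u := rest.filter (fun p => !m.contains p) with hu
      have hupid : ∀ x, x ∈ u → (x == pid) = false := by
        intro x hx
        have : x ∈ rest := List.mem_of_mem_filter hx
        simp only [beq_eq_false_iff_ne]
        intro h; exact hpr (h ▸ this)
      -- the filter A's inner scan performs
      have hms : byLen.filter (fun o => !(m.insert pid pid).contains o && nbrs.contains o)
          = u.filter (fun o => nbrs.contains o) := by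
        have h1 : (fun o => !(m.insert pid pid).contains o && nbrs.contains o)
            = (fun o => (!(o == pid) && nbrs.contains o) && !m.contains o) := by
          funext x
          rw [PySem.Dict.contains_insert]
          cases hx : x == pid <;> cases hm : m.contains x <;> simp
        rw [h1, ← List.filter_filter, hfil, hfc, List.filter_cons]
        simp only [BEq.rfl, Bool.not_true, Bool.false_and, Bool.false_eq_true, if_false]
        apply List.filter_congr
        intro x hx
        rw [hupid x hx]
        rfl
      -- A's one cluster step
      have hstep : gcStepA nd byLen (m, r) pid
          = ((u.filter (fun o => nbrs.contains o)).foldl (fun d x => d.insert x pid)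
               (m.insert pid pid),
             r.insert pid (pid :: u.filter (fun o => nbrs.contains o))) := by
        unfold gcStepA
        rw [if_neg hp, gc_innerA nbrs pid byLen hbl, hms, gc_rfold,
            gc_modify_not_contains r pid hrc]
        rfl
      set ufn := u.filter (fun o => nbrs.contains o) with hufn
      set m' := ufn.foldl (fun d x => d.insert x pid) (m.insert pid pid) with hm'
      have hcm' : ∀ x, m'.contains x = ((x == pid || m.contains x) || ufn.contains x) := by
        intro x
        rw [hm', gc_contains_foldl_insert, PySem.Dict.contains_insert]
      -- filtering by the new assignment dict = old filter, then drop pid and the new members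
      have hsplit' : ∀ w : List String, w.filter (fun p => !m'.contains p)
          = (w.filter (fun p => !m.contains p)).filter
              (fun p => !(p == pid) && !ufn.contains p) := by
        intro w
        have h1 : (fun p => !m'.contains p)
            = (fun p => (!(p == pid) && !ufn.contains p) && !m.contains p) := by
          funext x
          rw [hcm' x]
          cases hx : x == pid <;> cases hm : m.contains x <;> cases hf : ufn.contains x <;>
            simp
        rw [h1, ← List.filter_filter]
      -- on u, "not pid and not a new member" is just "not a neighbor"
      have hqu : u.filter (fun p => !(p == pid) && !ufn.contains p)
          = u.filter (fun o => !nbrs.contains o) := by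
        apply List.filter_congr
        intro x hx
        rw [hupid x hx, Bool.not_false, Bool.true_and]
        cases hn : nbrs.contains x with
        | true =>
          have hc : ufn.contains x = true := by
            rw [List.contains_iff_mem, hufn, List.mem_filter]
            exact ⟨hx, hn⟩
          rw [hc]
        | false =>
          have hc : ufn.contains x = false := by
            cases hc : ufn.contains x with
            | false => rfl
            | true =>
              have := (List.mem_filter.mp (List.contains_iff_mem.mp hc)).2
              rw [hn] at this; cases this
          rw [hc]
      have hrest' : rest.filter (fun p => !m'.contains p)
          = u.filter (fun o => !nbrs.contains o) := by
        rw [hsplit' rest, ← hu, hqu]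
      have hfil' : byLen.filter (fun p => !m'.contains p)
          = rest.filter (fun p => !m'.contains p) := by
        rw [hsplit' byLen, hfil, hfc, List.filter_cons, hsplit' rest, ← hu]
        simp
      have hinv' : ∀ k, (r.insert pid (pid :: ufn)).contains k = true → m'.contains k = true := by
        intro k hk
        rw [PySem.Dict.contains_insert] at hk
        rw [hcm' k]
        rcases Bool.or_eq_true_iff.mp hk with h | h
        · rw [h]; rfl
        · rw [hinv k h]; simp
      rw [hstep, ih m' (r.insert pid (pid :: ufn)) hrnd hfil' hinv', hrest', hfc,
          gcClusters]
      simp only [List.foldl_cons]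
      rfl

-- ===== VERDICT (by name: the statement is the Claim_ definition above) =====
theorem greedy_cluster_spec : Claim_equal_greedy_cluster := by
  intro proteins neighbors _ hpre
  unfold Spec_greedy_cluster greedy_cluster greedy_cluster_alt
  simp only
  have hnd : (PySem.List.sorted (PySem.Dict.mk proteins).keys
      (fun p => -(PySem.Str.len ((PySem.Dict.mk proteins).getD p ""))) false).Nodup := by
    apply (PySem.List.sorted_perm _ _ _).nodup_iff.mpr
    simpa [PySem.Dict.keys] using hpre
  have h := gc_main (PySem.Dict.mk neighbors) _ hnd _ PySem.Dict.empty PySem.Dict.empty hnd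
    rfl (by intro k h; simp [PySem.Dict.contains_empty] at h)
  simp only [PySem.Dict.contains_empty, Bool.not_false, List.filter_true] at h
  rw [h]
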